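-- pv_equiv track=rewrite | github.com/asdru22/Cognition | z_other/scripts/axe_interactions/main.py | make_blockstates
-- ===== SOURCE A (Python) =====
-- import itertools
--
-- def make_blockstates(block,new_block,block_states):
--   commands = ""
--
--   # Extract keys (state names) and values (possible options) from the block states dictionary
--   state_names = list(block_states.keys())
--   state_values = list(block_states.values())
--
--   # Generate all combinations of block states
--   state_combinations = itertools.product(*state_values)
--   # For each combination of block states, generate the corresponding command
--   for combination in state_combinations:
--       # Create the block state string in the form "[state1=value1,state2=value2,...]"
--       state_string = ",".join([f"{name}={value}" for name, value in zip(state_names, combination)])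
--
--       # Generate the Minecraft function command with the state string
--       command = f"execute if block ~ ~ ~ {block}[{state_string}] run return run setblock ~ ~ ~ {new_block}[{state_string}]\n"
--
--       # Add the command to the final result
--       commands += command
--
--   return commands
-- ===== SOURCE B (Python) =====
-- def make_blockstates(block, new_block, block_states):
--     # Build the product of state values incrementally as partial "name=value" strings.
--     partials = [""]
--     for name, values in block_states.items():
--         partials = [(p + "," if p else p) + f"{name}={value}"
--                     for p in partials for value in values]
--     commands = ""
--     for p in partials:
--         commands += f"execute if block ~ ~ ~ {block}[{p}] run return run setblock ~ ~ ~ {new_block}[{p}]\n"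
--     return commands
-- ===== Notes on version B (the rewrite author's own statement) =====
-- stated objective: alternative
-- what changed: B drops itertools.product entirely: it folds each (name, values) pair into an accumulator of partial 'name=value,...' strings (starting from [""]), so the product is built incrementally as strings instead of enumerating value tuples and zipping them with the key names.
import Mathlib
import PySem

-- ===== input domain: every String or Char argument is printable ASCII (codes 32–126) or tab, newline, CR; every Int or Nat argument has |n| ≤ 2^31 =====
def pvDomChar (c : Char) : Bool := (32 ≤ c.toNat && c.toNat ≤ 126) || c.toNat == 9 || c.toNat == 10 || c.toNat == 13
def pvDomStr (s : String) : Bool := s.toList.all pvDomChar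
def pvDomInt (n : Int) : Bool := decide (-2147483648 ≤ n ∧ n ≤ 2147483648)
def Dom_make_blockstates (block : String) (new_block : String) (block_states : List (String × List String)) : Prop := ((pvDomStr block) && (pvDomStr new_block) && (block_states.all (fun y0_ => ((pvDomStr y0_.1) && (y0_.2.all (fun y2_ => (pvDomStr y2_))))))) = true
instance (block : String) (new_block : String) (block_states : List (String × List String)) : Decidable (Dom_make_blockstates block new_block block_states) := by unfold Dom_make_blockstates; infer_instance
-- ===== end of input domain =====

-- B builds the state-string product incrementally with an accumulator of partial strings
-- instead of enumerating itertools.product tuples and zipping with the key names (objective: alternative decomposition).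

-- ===== PORT A =====
-- itertools.product(*state_values): last factor varies fastest
def pvProdA : List (List String) → List (List String)
  | [] => [[]]
  | vs :: rest => vs.flatMap (fun v => (pvProdA rest).map (fun c => v :: c))

-- the f-string command template of A
def pvCmdA (block : String) (new_block : String) (state_string : String) : String :=
  "execute if block ~ ~ ~ " ++ block ++ "[" ++ state_string ++ "] run return run setblock ~ ~ ~ " ++ new_block ++ "[" ++ state_string ++ "]\n"

def make_blockstates (block : String) (new_block : String) (block_states : List (String × List String)) : String :=
  let d := PySem.Dict.ofList block_states
  let state_names := PySem.Dict.keys d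
  let state_values := PySem.Dict.values d
  let state_combinations := pvProdA state_values
  state_combinations.foldl (fun commands combination =>
    let state_string := PySem.Str.join "," ((state_names.zip combination).map (fun nv => nv.1 ++ "=" ++ nv.2))
    commands ++ pvCmdA block new_block state_string) ""

-- ===== PORT B =====
-- the f-string command template of B
def pvCmdB (block : String) (new_block : String) (p : String) : String :=
  "execute if block ~ ~ ~ " ++ block ++ "[" ++ p ++ "] run return run setblock ~ ~ ~ " ++ new_block ++ "[" ++ p ++ "]\n"

def make_blockstates_alt (block : String) (new_block : String) (block_states : List (String × List String)) : String :=
  let items := (PySem.Dict.ofList block_states).items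
  let partials := items.foldl (fun partials nv =>
    partials.flatMap (fun p => nv.2.map (fun v =>
      (if p = "" then p else p ++ ",") ++ (nv.1 ++ "=" ++ v)))) [""]
  partials.foldl (fun commands p => commands ++ pvCmdB block new_block p) ""

-- ===== PRECONDITION & SPEC =====
def Spec_make_blockstates (block : String) (new_block : String) (block_states : List (String × List String)) (out : String) : Prop := out = make_blockstates_alt block new_block block_states
instance (block : String) (new_block : String) (block_states : List (String × List String)) (out : String) : Decidable (Spec_make_blockstates block new_block block_states out) := by unfold Spec_make_blockstates; infer_instance

-- ===== CLAIM (what is proved, stated in full; the proofs are below) =====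
def Claim_equal_make_blockstates : Prop := ∀ (block : String) (new_block : String) (block_states : List (String × List String)), Dom_make_blockstates block new_block block_states → Spec_make_blockstates block new_block block_states (make_blockstates block new_block block_states)

-- ===== LEMMAS AND PROOFS =====

-- ",".join as a named function
def pvJC (ts : List String) : String := PySem.Str.join "," ts

-- canonical list of "name=value" token lists, in itertools.product order
def pvTok : List (String × List String) → List (List String)
  | [] => [[]]
  | nv :: rest => nv.2.flatMap (fun v => (pvTok rest).map (fun c => (nv.1 ++ "=" ++ v) :: c))

lemma pvJC_nil : pvJC [] = "" := by decide

lemma pvJC_singleton (x : String) : pvJC [x] = x := by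
  apply String.toList_inj.mp
  simp [pvJC, PySem.Str.toList_join, PySem.Chars.join, List.intercalate]

lemma icat_cons_ne_nil (s a : List Char) (r : List (List Char)) (ha : a ≠ []) :
    List.intercalate s (a :: r) ≠ [] := by
  cases r <;> simp_all [List.intercalate, List.intersperse]

lemma icat_append_singleton (s x : List Char) :
    ∀ (r : List (List Char)) (a : List Char),
      List.intercalate s (a :: (r ++ [x])) = List.intercalate s (a :: r) ++ s ++ x := by
  intro r
  induction r with
  | nil => intro a; simp [List.intercalate, List.intersperse]
  | cons b r ih =>
      intro a
      have h1 : List.intercalate s (a :: b :: (r ++ [x])) = a ++ s ++ List.intercalate s (b :: (r ++ [x])) := by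
        simp [List.intercalate, List.intersperse]
      have h2 : List.intercalate s (a :: b :: r) = a ++ s ++ List.intercalate s (b :: r) := by
        simp [List.intercalate, List.intersperse]
      simp only [List.cons_append] at h1 ⊢
      rw [h1, ih b, h2]
      simp [List.append_assoc]

lemma empty_toList : ("" : String).toList = [] := by decide

lemma comma_toList : ("," : String).toList = [','] := by decide

lemma pvJC_cons_ne (a : String) (ts : List String) (ha : a ≠ "") : pvJC (a :: ts) ≠ "" := by
  intro h
  have h' := congrArg String.toList h
  rw [empty_toList] at h'
  simp only [pvJC, PySem.Str.toList_join, PySem.Chars.join, List.map_cons] at h'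
  exact icat_cons_ne_nil _ _ _ (fun hn => ha (String.toList_inj.mp (by rw [hn, empty_toList]))) h'

lemma pvJC_cons_append (a x : String) (ts : List String) :
    pvJC ((a :: ts) ++ [x]) = pvJC (a :: ts) ++ "," ++ x := by
  apply String.toList_inj.mp
  simp only [String.toList_append, pvJC, PySem.Str.toList_join, PySem.Chars.join,
    List.map_append, List.map_cons, List.map_nil, comma_toList]
  exact icat_append_singleton [','] x.toList (ts.map String.toList) a.toList

-- the incremental extension step equals joining the extended token list
lemma pvExt_eq (ts : List String) (x : String) (h : ∀ s ∈ ts, s ≠ "") :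
    (if pvJC ts = "" then pvJC ts else pvJC ts ++ ",") ++ x = pvJC (ts ++ [x]) := by
  cases ts with
  | nil =>
      rw [pvJC_nil]
      simp [pvJC_singleton]
  | cons a ts' =>
      have hne : pvJC (a :: ts') ≠ "" := pvJC_cons_ne a ts' (h a (by simp))
      rw [if_neg hne, pvJC_cons_append, String.append_assoc]

lemma pv_nv_ne_empty (n v : String) : n ++ "=" ++ v ≠ "" := by
  intro h
  have h' := congrArg String.toList h
  rw [empty_toList] at h'
  simp [String.toList_append, show ("=" : String).toList = ['='] from by decide] at h'

-- A-side: mapping zip-join over the product gives the canonical token lists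
lemma pvA_tok (l : List (String × List String)) :
    (pvProdA (l.map (fun x => x.2))).map
      (fun c => ((l.map (fun x => x.1)).zip c).map (fun nv => nv.1 ++ "=" ++ nv.2)) = pvTok l := by
  induction l with
  | nil => simp [pvProdA, pvTok]
  | cons nv rest ih =>
      simp only [List.map_cons, pvProdA, pvTok, List.map_flatMap, List.map_map]
      refine congrArg (fun f => List.flatMap f nv.2) (funext fun v => ?_)
      have hfun : ((fun c => ((nv.1 :: rest.map (fun x => x.1)).zip c).map
            (fun p : String × String => p.1 ++ "=" ++ p.2)) ∘ (fun c => v :: c))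
          = (fun c => (nv.1 ++ "=" ++ v) ::
              (((rest.map (fun x => x.1)).zip c).map (fun p : String × String => p.1 ++ "=" ++ p.2))) := by
        funext c; simp
      rw [hfun, ← ih, List.map_map]
      rfl

-- B-side token-level fold equals the canonical token lists
lemma pvB_tokL (l : List (String × List String)) :
    ∀ (Ts : List (List String)),
      l.foldl (fun Ts nv => Ts.flatMap (fun ts => nv.2.map (fun v => ts ++ [nv.1 ++ "=" ++ v]))) Ts
        = Ts.flatMap (fun ts => (pvTok l).map (fun c => ts ++ c)) := by
  induction l with
  | nil => intro Ts; simp [pvTok]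
  | cons nv rest ih =>
      intro Ts
      rw [List.foldl_cons, ih]
      simp only [pvTok, List.flatMap_assoc, List.map_flatMap, List.flatMap_map, List.map_map]
      simp [Function.comp_def, List.append_assoc]

-- B-side: the string fold mirrors the token fold through ",".join
lemma pvB_str (l : List (String × List String)) :
    ∀ (Ts : List (List String)), (∀ ts ∈ Ts, ∀ s ∈ ts, s ≠ "") →
      l.foldl (fun partials nv => partials.flatMap (fun p => nv.2.map (fun v =>
          (if p = "" then p else p ++ ",") ++ (nv.1 ++ "=" ++ v)))) (Ts.map pvJC)
        = (l.foldl (fun Ts nv => Ts.flatMap (fun ts => nv.2.map (fun v => ts ++ [nv.1 ++ "=" ++ v]))) Ts).map pvJC := by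
  induction l with
  | nil => intro Ts _; rfl
  | cons nv rest ih =>
      intro Ts h
      rw [List.foldl_cons, List.foldl_cons]
      have hstep : (Ts.map pvJC).flatMap (fun p => nv.2.map (fun v =>
            (if p = "" then p else p ++ ",") ++ (nv.1 ++ "=" ++ v)))
          = (Ts.flatMap (fun ts => nv.2.map (fun v => ts ++ [nv.1 ++ "=" ++ v]))).map pvJC := by
        induction Ts with
        | nil => rfl
        | cons ts Ts' ihT =>
            simp only [List.map_cons, List.flatMap_cons, List.map_append, List.map_map]
            rw [ihT (fun t ht s hs => h t (List.mem_cons_of_mem _ ht) s hs)]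
            congr 1
            refine List.map_congr_left (fun v _ => ?_)
            exact pvExt_eq ts (nv.1 ++ "=" ++ v) (h ts List.mem_cons_self)
      rw [hstep, ih]
      intro ts' hts' s hs
      rcases List.mem_flatMap.mp hts' with ⟨ts, hts, hmem⟩
      rcases List.mem_map.mp hmem with ⟨v, _, rfl⟩
      rcases List.mem_append.mp hs with h1 | h2
      · exact h ts hts s h1
      · rw [List.mem_singleton.mp h2]; exact pv_nv_ne_empty nv.1 v

-- ===== VERDICT (by name: the statement is the Claim_ definition above) =====
theorem make_blockstates_spec : Claim_equal_make_blockstates := by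
  intro block new_block bs _
  unfold Spec_make_blockstates make_blockstates make_blockstates_alt
  simp only [PySem.Dict.keys, PySem.Dict.values]
  have hB : (PySem.Dict.ofList bs).items.foldl (fun partials nv =>
        partials.flatMap (fun p => nv.2.map (fun v =>
          (if p = "" then p else p ++ ",") ++ (nv.1 ++ "=" ++ v)))) [""]
      = (pvTok (PySem.Dict.ofList bs).items).map pvJC := by
    have h0 : ([""] : List String) = ([[]] : List (List String)).map pvJC := by
      simp [pvJC_nil]
    rw [h0, pvB_str _ [[]] (by intro ts hts s hs; simp at hts; subst hts; simp at hs),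
        pvB_tokL _ [[]]]
    simp
  rw [hB]
  rw [← List.foldl_map (f := fun combination => PySem.Str.join ","
        ((((PySem.Dict.ofList bs).items.map (fun x => x.1)).zip combination).map (fun nv => nv.1 ++ "=" ++ nv.2)))
      (g := fun commands s => commands ++ pvCmdA block new_block s)]
  have hA : (pvProdA ((PySem.Dict.ofList bs).items.map (fun x => x.2))).map
      (fun combination => PySem.Str.join ","
        ((((PySem.Dict.ofList bs).items.map (fun x => x.1)).zip combination).map (fun nv => nv.1 ++ "=" ++ nv.2)))
      = (pvTok (PySem.Dict.ofList bs).items).map pvJC := by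
    rw [← pvA_tok (PySem.Dict.ofList bs).items, List.map_map]
    rfl
  rw [hA]
  rfl
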